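-- pv_equiv track=rewrite | github.com/Abilash-Sivasith/Affine-Cipher-and-Tools-Repo | letter_frequency.py | find_letter_frequency
-- ===== SOURCE A (Python) =====
-- def find_letter_frequency(text):
--     """finds the frequency of letters"""
--     count_of_letter = dict()
--     for letter in text.strip():
--         if letter != ' ':
--             if letter not in count_of_letter:
--                 count_of_letter[letter] = 1
--             else:
--                 count_of_letter[letter] += 1
--     sorted_letter_frequency = sorted(count_of_letter.items(), key=lambda x:x[1], reverse= True)
--     return sorted_letter_frequency
-- ===== SOURCE B (Python) =====
-- def find_letter_frequency(text):
--     """finds the frequency of letters (counting-sort by count, no sorted())"""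
--     counts = {}
--     for letter in text.strip():
--         if letter != ' ':
--             counts[letter] = counts.get(letter, 0) + 1
--     m = 0
--     for c in counts.values():
--         if c > m:
--             m = c
--     result = []
--     for c in range(m, 0, -1):
--         for item in counts.items():
--             if item[1] == c:
--                 result.append(item)
--     return result
-- ===== Notes on version B (the rewrite author's own statement) =====
-- stated objective: alternative
-- what changed: Replaces sorted(items, key=count, reverse=True) with a counting-sort style emission: compute the maximum count and, for each count value from max down to 1, append the items with that count in dict insertion order, reproducing the stable descending order without sorting.
import Mathlib
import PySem

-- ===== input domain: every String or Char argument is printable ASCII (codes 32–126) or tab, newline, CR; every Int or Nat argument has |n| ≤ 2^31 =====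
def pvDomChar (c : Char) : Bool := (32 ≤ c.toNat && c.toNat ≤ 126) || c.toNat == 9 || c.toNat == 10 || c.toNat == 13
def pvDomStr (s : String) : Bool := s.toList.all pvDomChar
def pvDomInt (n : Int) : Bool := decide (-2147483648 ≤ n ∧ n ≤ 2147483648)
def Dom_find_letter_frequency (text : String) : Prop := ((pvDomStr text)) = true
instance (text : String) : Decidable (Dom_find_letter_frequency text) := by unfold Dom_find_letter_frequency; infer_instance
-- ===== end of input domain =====

-- B replaces sorted(...) by a counting-sort walk (emit items whose count equals c, for c from the maximum count down to 1); objective: alternative.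

-- ===== PORT A =====
def find_letter_frequency (text : String) : List (String × Int) :=
  let count_of_letter : PySem.Dict String Int :=
    (PySem.Str.strip text).toList.foldl
      (fun d letter =>
        if String.mk [letter] ≠ " " then
          if ¬ (d.contains (String.mk [letter])) then
            d.insert (String.mk [letter]) 1
          else
            d.modify (String.mk [letter]) 0 (· + 1)
        else d)
      PySem.Dict.empty
  PySem.List.sorted count_of_letter.items (fun x => x.2) true

-- ===== PORT B =====
def find_letter_frequency_alt (text : String) : List (String × Int) :=
  let counts : PySem.Dict String Int :=
    (PySem.Str.strip text).toList.foldl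
      (fun d letter =>
        if String.mk [letter] ≠ " " then
          d.insert (String.mk [letter]) (d.getD (String.mk [letter]) 0 + 1)
        else d)
      PySem.Dict.empty
  let m : Int := counts.values.foldl (fun m c => if c > m then c else m) 0
  (PySem.List.pyRange m 0 (-1)).foldl
    (fun result c =>
      counts.items.foldl
        (fun result item => if item.2 = c then result ++ [item] else result)
        result)
    []

-- ===== PRECONDITION & SPEC =====
def Spec_find_letter_frequency (text : String) (out : List (String × Int)) : Prop := out = find_letter_frequency_alt text
instance (text : String) (out : List (String × Int)) : Decidable (Spec_find_letter_frequency text out) := by unfold Spec_find_letter_frequency; infer_instance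

-- ===== CLAIM (what is proved, stated in full; the proofs are below) =====
def Claim_equal_find_letter_frequency : Prop := ∀ (text : String), Dom_find_letter_frequency text → Spec_find_letter_frequency text (find_letter_frequency text)

-- ===== LEMMAS AND PROOFS =====

-- the two counting loops build the same dict (Dict.modify k 0 (·+1) IS insert k (getD k 0 + 1))
theorem pv_get?_none_of_not_contains {ν : Type} (d : PySem.Dict String ν) (k : String)
    (h : d.contains k = false) : d.get? k = none := by
  obtain ⟨items⟩ := d
  induction items with
  | nil => rfl
  | cons p rest ih =>
    simp [PySem.Dict.contains] at h
    rw [PySem.Dict.get?_mk_cons]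
    have h1 : (p.1 == k) = false := by simp [h.1]
    rw [h1]
    simp only [Bool.false_eq_true, if_false]
    exact ih (by simp [PySem.Dict.contains]; exact h.2)

theorem pv_step_eq (d : PySem.Dict String Int) (letter : Char) :
    (if String.mk [letter] ≠ " " then
      if ¬ (d.contains (String.mk [letter])) then d.insert (String.mk [letter]) 1
      else d.modify (String.mk [letter]) 0 (· + 1)
     else d)
    = (if String.mk [letter] ≠ " " then
        d.insert (String.mk [letter]) (d.getD (String.mk [letter]) 0 + 1)
       else d) := by
  by_cases hsp : String.mk [letter] ≠ " "
  · simp only [if_pos hsp]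
    by_cases hc : d.contains (String.mk [letter]) = true
    · simp [hc, PySem.Dict.modify]
    · have hn := pv_get?_none_of_not_contains d (String.mk [letter]) (by simpa using hc)
      simp [hc, PySem.Dict.getD, hn]
  · simp [hsp]

-- membership through insert
theorem pv_mem_items_insert {ν : Type} (d : PySem.Dict String ν) (k : String) (v : ν)
    (p : String × ν) (hp : p ∈ (d.insert k v).items) : p.2 = v ∨ p ∈ d.items := by
  unfold PySem.Dict.insert at hp
  split at hp
  · simp only at hp
    rcases List.mem_map.mp hp with ⟨q, hq, hpq⟩
    by_cases h : (q.1 == k) = true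
    · left; simp [h] at hpq; simp [← hpq]
    · right; simp [h] at hpq; simpa [hpq] using hq
  · simp only at hp
    rcases List.mem_append.mp hp with h | h
    · right; exact h
    · left; simp at h; simp [h]

theorem pv_get?_mem {ν : Type} (d : PySem.Dict String ν) (k : String) (v : ν)
    (h : d.get? k = some v) : (k, v) ∈ d.items := by
  obtain ⟨items⟩ := d
  induction items with
  | nil => simp [PySem.Dict.get?] at h
  | cons p rest ih =>
    rw [PySem.Dict.get?_mk_cons] at h
    by_cases hk : (p.1 == k) = true
    · simp [hk] at h
      have hp : p = (k, v) := by
        have : p.1 = k := by simpa using hk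
        cases p; simp_all
      show (k, v) ∈ p :: rest
      simp [hp]
    · simp [hk] at h
      show (k, v) ∈ p :: rest
      exact List.mem_cons_of_mem _ (ih h)

-- every count stored by the loop is ≥ 1
theorem pv_values_pos (s : List Char) (d : PySem.Dict String Int)
    (hd : ∀ p ∈ d.items, 1 ≤ p.2) :
    ∀ p ∈ (s.foldl
      (fun d letter =>
        if String.mk [letter] ≠ " " then
          d.insert (String.mk [letter]) (d.getD (String.mk [letter]) 0 + 1)
        else d) d).items, 1 ≤ p.2 := by
  induction s generalizing d with
  | nil => simpa using hd
  | cons c rest ih =>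
    intro p hp
    refine ih _ ?_ p hp
    intro q hq
    by_cases hsp : String.mk [c] ≠ " "
    · simp only [if_pos hsp] at hq
      rcases pv_mem_items_insert _ _ _ _ hq with h | h
      · rw [h]
        rcases hg : (d.get? (String.mk [c])) with _ | v
        · simp [PySem.Dict.getD, hg]
        · have := hd _ (pv_get?_mem _ _ _ hg)
          simp [PySem.Dict.getD, hg]
          omega
      · exact hd _ h
    · simp only [if_neg hsp] at hq
      exact hd _ hq

-- [m, m-1, …, 1] as a Nat-indexed list
def pvDescN : Nat → List Int
  | 0 => []
  | n+1 => ((n : Int) + 1) :: pvDescN n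

theorem pv_mem_descN (n : Nat) (c : Int) : c ∈ pvDescN n ↔ 1 ≤ c ∧ c ≤ (n : Int) := by
  induction n with
  | zero => simp [pvDescN]; omega
  | succ k ih =>
    simp [pvDescN, ih]
    omega

theorem pv_range_map (n : Nat) :
    (List.range n).map (fun k : Nat => (n : Int) + (-1) * (k : Int)) = pvDescN n := by
  induction n with
  | zero => simp [pvDescN]
  | succ k ih =>
    rw [List.range_succ_eq_map]
    simp only [List.map_cons, List.map_map, pvDescN]
    congr 1
    rw [← ih]
    apply List.map_congr_left
    intro x _
    simp only [Function.comp_apply]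
    push_cast
    ring

theorem pv_pyRange_desc (m : Int) (hm : 0 ≤ m) :
    PySem.List.pyRange m 0 (-1) = pvDescN m.toNat := by
  unfold PySem.List.pyRange
  have h1 : ¬ ((-1 : Int) = 0) := by decide
  have h2 : ¬ ((0 : Int) < -1) := by decide
  simp only [if_neg h1, if_neg h2]
  by_cases h0 : (0 : Int) < m
  · rw [if_pos h0]
    have hc : ((m - 0 + -(-1) - 1) / -(-1)).toNat = m.toNat := by
      norm_num
    rw [hc]
    have := pv_range_map m.toNat
    rw [show ((m.toNat : Int)) = m from by omega] at this
    exact this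
  · rw [if_neg h0]
    have : m = 0 := by omega
    simp [this, pvDescN]

-- insertBy slides past a prefix no element of which triggers `before`
theorem pv_insertBy_append_left {α : Type} (before : α → α → Bool) (x : α) (A B : List α)
    (hA : ∀ y ∈ A, before x y = false) :
    PySem.List.insertBy before x (A ++ B) = A ++ PySem.List.insertBy before x B := by
  induction A with
  | nil => simp
  | cons a rest ih =>
    have ha : before x a = false := hA a (by simp)
    have : PySem.List.insertBy before x (a :: (rest ++ B)) =
        a :: PySem.List.insertBy before x (rest ++ B) := by
      cases h : rest ++ B with
      | nil => simp [PySem.List.insertBy, ha]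
      | cons b t => simp [PySem.List.insertBy, ha]
    simp only [List.cons_append, this, ih (fun y hy => hA y (by simp [hy]))]

theorem pv_insertBy_all_before {α : Type} (before : α → α → Bool) (x : α) (B : List α)
    (hB : ∀ y ∈ B, before x y = true) :
    PySem.List.insertBy before x B = x :: B := by
  cases B with
  | nil => simp [PySem.List.insertBy]
  | cons b t => simp [PySem.List.insertBy, hB b (by simp)]

-- the descending bucket concatenation
def pvF (n : Nat) (l : List (String × Int)) : List (String × Int) :=
  (pvDescN n).flatMap (fun c => l.filter (fun p => decide (p.2 = c)))

theorem pv_mem_F (n : Nat) (l : List (String × Int)) (y : String × Int) (hy : y ∈ pvF n l) :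
    y ∈ l ∧ 1 ≤ y.2 ∧ y.2 ≤ (n : Int) := by
  unfold pvF at hy
  rcases List.mem_flatMap.mp hy with ⟨c, hc, hyc⟩
  rcases List.mem_filter.mp hyc with ⟨hyl, hv⟩
  have hc' := (pv_mem_descN n c).mp hc
  have : y.2 = c := by simpa using hv
  exact ⟨hyl, by omega, by omega⟩

theorem pv_F_append (n : Nat) (l : List (String × Int)) (x : String × Int)
    (hx1 : 1 ≤ x.2) (hxn : x.2 ≤ (n : Int)) :
    PySem.List.insertBy (fun a b => decide (b.2 < a.2)) x (pvF n l) = pvF n (l ++ [x]) := by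
  induction n with
  | zero => exact absurd hxn (by omega)
  | succ k ih =>
    have hsplit : ∀ (l' : List (String × Int)), pvF (k+1) l' =
        l'.filter (fun p => decide (p.2 = (k : Int) + 1)) ++ pvF k l' := by
      intro l'; simp [pvF, pvDescN]
    by_cases hx : x.2 = (k : Int) + 1
    · -- x belongs to the topmost bucket: it goes right after that bucket
      rw [hsplit l, pv_insertBy_append_left _ _ _ _ ?hA, pv_insertBy_all_before _ _ _ ?hB]
      case hA =>
        intro y hy
        have := (List.mem_filter.mp hy).2
        simp at this ⊢
        omega
      case hB =>
        intro y hy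
        have := (pv_mem_F k l y hy).2.2
        simp
        omega
      · rw [hsplit (l ++ [x])]
        have h1 : (l ++ [x]).filter (fun p => decide (p.2 = (k : Int) + 1)) =
            l.filter (fun p => decide (p.2 = (k : Int) + 1)) ++ [x] := by
          simp [List.filter_append, hx]
        have h2 : pvF k (l ++ [x]) = pvF k l := by
          unfold pvF
          apply List.flatMap_congr
          intro c hc
          have := (pv_mem_descN k c).mp hc
          simp [List.filter_append]
          omega
        rw [h1, h2]
        simp
    · -- x belongs to a lower bucket: slide past the topmost bucket and recurse
      have hxk : x.2 ≤ (k : Int) := by push_cast at hxn; omega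
      rw [hsplit l, pv_insertBy_append_left _ _ _ _ ?hA2, ih hxk]
      case hA2 =>
        intro y hy
        have := (List.mem_filter.mp hy).2
        simp at this ⊢
        omega
      rw [hsplit (l ++ [x])]
      have h1 : (l ++ [x]).filter (fun p => decide (p.2 = (k : Int) + 1)) =
          l.filter (fun p => decide (p.2 = (k : Int) + 1)) := by
        simp [List.filter_append, hx]
      rw [h1]

theorem pv_sort_eq_buckets (l : List (String × Int)) (n : Nat)
    (hl : ∀ p ∈ l, 1 ≤ p.2 ∧ p.2 ≤ (n : Int)) :
    PySem.List.sorted l (fun x => x.2) true = pvF n l := by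
  rw [PySem.List.sorted_rev_eq_foldl_insertBy]
  induction l using List.reverseRecOn with
  | nil =>
    unfold pvF
    induction n with
    | zero => simp [pvDescN]
    | succ k ih => simpa [pvDescN] using ih
  | append_singleton l' x ih =>
    rw [List.foldl_append]
    simp only [List.foldl_cons, List.foldl_nil]
    rw [ih (fun p hp => hl p (by simp [hp]))]
    have hx := hl x (by simp)
    exact pv_F_append n l' x hx.1 hx.2

theorem pv_nested_foldl (items : List (String × Int)) (cs : List Int)
    (acc : List (String × Int)) :
    cs.foldl (fun result c => items.foldl
        (fun result item => if item.2 = c then result ++ [item] else result) result) acc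
      = acc ++ cs.flatMap (fun c => items.filter (fun p => decide (p.2 = c))) := by
  induction cs generalizing acc with
  | nil => simp
  | cons b bs ih =>
    simp only [List.foldl_cons, List.flatMap_cons]
    rw [PySem.List.foldl_append_ite_eq_filter (fun x => x.2 = b) items acc, ih]
    simp

-- ===== VERDICT (by name: the statement is the Claim_ definition above) =====
theorem find_letter_frequency_spec : Claim_equal_find_letter_frequency := by
  intro text _
  unfold Spec_find_letter_frequency find_letter_frequency find_letter_frequency_alt
  simp only []
  -- identical counting dicts
  have hstep : (fun (d : PySem.Dict String Int) (letter : Char) =>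
      if String.mk [letter] ≠ " " then
        if ¬ (d.contains (String.mk [letter])) then d.insert (String.mk [letter]) 1
        else d.modify (String.mk [letter]) 0 (· + 1)
      else d)
    = (fun (d : PySem.Dict String Int) (letter : Char) =>
        if String.mk [letter] ≠ " " then
          d.insert (String.mk [letter]) (d.getD (String.mk [letter]) 0 + 1)
        else d) := by
    funext d letter; exact pv_step_eq d letter
  rw [hstep]
  set counts := (PySem.Str.strip text).toList.foldl
      (fun (d : PySem.Dict String Int) (letter : Char) =>
        if String.mk [letter] ≠ " " then
          d.insert (String.mk [letter]) (d.getD (String.mk [letter]) 0 + 1)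
        else d) PySem.Dict.empty with hcounts
  have hpos : ∀ p ∈ counts.items, 1 ≤ p.2 := by
    rw [hcounts]
    exact pv_values_pos _ _ (by simp [PySem.Dict.empty])
  -- the running max
  have hmaxf : (fun (m c : Int) => if c > m then c else m) = (fun m c => max m c) := by
    funext m c
    by_cases h : c > m
    · simp [h]; omega
    · simp [h]; omega
  set m := counts.values.foldl (fun m c => if c > m then c else m) 0 with hm
  have hm' : m = counts.values.foldl max 0 := by rw [hm, hmaxf]
  have hmax := PySem.List.le_foldl_max counts.values 0
  have hm0 : 0 ≤ m := by rw [hm']; exact hmax.1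
  have hub : ∀ p ∈ counts.items, p.2 ≤ m := by
    intro p hp
    rw [hm']
    exact hmax.2 p.2 (by simp [PySem.Dict.values]; exact ⟨p.1, by simpa using hp⟩)
  -- B's nested loops are the bucket concatenation
  rw [pv_pyRange_desc m hm0]
  have hbounds : ∀ p ∈ counts.items, 1 ≤ p.2 ∧ p.2 ≤ ((m.toNat : Nat) : Int) := by
    intro p hp
    refine ⟨hpos p hp, ?_⟩
    have := hub p hp
    omega
  rw [pv_sort_eq_buckets counts.items m.toNat hbounds]
  rw [pv_nested_foldl counts.items (pvDescN m.toNat) []]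
  simp [pvF]
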